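-- pv_equiv track=rewrite | github.com/jsheng0901/leetcode | Array/2055.py | get_left
-- ===== SOURCE A (Python) =====
-- def get_left(s):
--     # 找到每个plate的最左边的candle index
--     left_index = [-1] * len(s)
--     # 初始化candle index指针为 -1
--     left = -1
--     for i in range(len(s)):
--         # 如果是plates，当前左边candle等于左candle指针
--         if s[i] == "*":
--             left_index[i] = left
--         # 如果是candle，更新当前左candle的指针，并赋值
--         elif s[i] == "|":
--             left = i
--             left_index[i] = i
--
--     return left_index
-- ===== SOURCE B (Python) =====
-- def get_left(s):
--     # per-position backward search: s.rfind('|', 0, i+1) is the nearest candle index <= i (or -1)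
--     return [s.rfind('|', 0, i + 1) if c in '*|' else -1 for i, c in enumerate(s)]
-- ===== Notes on version B (the rewrite author's own statement) =====
-- stated objective: simpler
-- what changed: Replaces the stateful left-to-right scan carrying a 'last candle' pointer by a one-line comprehension that, for each '*' or '|' position i, looks up the nearest candle directly with s.rfind('|', 0, i+1).
import Mathlib
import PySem

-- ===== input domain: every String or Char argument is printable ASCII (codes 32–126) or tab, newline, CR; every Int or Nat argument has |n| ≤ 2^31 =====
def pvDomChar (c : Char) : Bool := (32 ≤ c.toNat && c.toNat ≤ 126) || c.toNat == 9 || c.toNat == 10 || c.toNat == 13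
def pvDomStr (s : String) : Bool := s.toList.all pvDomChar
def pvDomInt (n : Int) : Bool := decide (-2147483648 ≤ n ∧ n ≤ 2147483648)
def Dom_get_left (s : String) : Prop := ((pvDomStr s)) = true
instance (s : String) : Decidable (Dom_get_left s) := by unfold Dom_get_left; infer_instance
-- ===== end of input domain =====

-- B replaces A's stateful scan by a per-position s.rfind('|', 0, i+1) lookup: simpler, not faster.

-- ===== PORT A =====
-- literal port of A: left_index = [-1]*len(s); left = -1; for i in range(len(s)): …
def get_left (s : String) : List Int :=
  ((PySem.List.pyRange 0 (s.toList.length : Int) 1).foldl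
    (fun (acc : List Int × Int) i =>
      if PySem.Str.pyGet? s i = some '*' then (acc.1.set i.toNat acc.2, acc.2)
      else if PySem.Str.pyGet? s i = some '|' then (acc.1.set i.toNat i, i)
      else acc)
    (List.replicate s.toList.length (-1), -1)).1

-- ===== PORT B =====
-- literal port of B: [s.rfind('|', 0, i+1) if c in '*|' else -1 for i, c in enumerate(s)]
def get_left_alt (s : String) : List Int :=
  (PySem.List.enumerate s.toList).map
    (fun p => if PySem.Str.isIn (String.ofList [p.2]) "*|"
              then PySem.Str.rfindFrom s "|" 0 (some (p.1 + 1)) else -1)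

-- ===== PRECONDITION & SPEC =====
def Spec_get_left (s : String) (out : List Int) : Prop := out = get_left_alt s
instance (s : String) (out : List Int) : Decidable (Spec_get_left s out) := by unfold Spec_get_left; infer_instance

-- ===== CLAIM (what is proved, stated in full; the proofs are below) =====
def Claim_equal_get_left : Prop := ∀ (s : String), Dom_get_left s → Spec_get_left s (get_left s)

-- ===== LEMMAS AND PROOFS =====

-- last candle index strictly below k (-1 if none)
def lastLt (cs : List Char) : Nat → Int
  | 0 => -1
  | k+1 => if cs[k]? = some '|' then (k : Int) else lastLt cs k

-- the common per-position value
def pvVal (cs : List Char) (i : Nat) : Int :=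
  if cs[i]? = some '*' then lastLt cs i
  else if cs[i]? = some '|' then (i : Int) else -1

theorem prefix_pipe (t : List Char) :
    (['|'].isPrefixOf t) = (t[0]? == some '|') := by
  cases t with
  | nil => rfl
  | cons a t => simp [List.isPrefixOf, eq_comm]

theorem go_eq (cs : List Char) (m : Nat) :
    PySem.Chars.rfind.go cs ['|'] m = lastLt cs (m + 1) := by
  induction m with
  | zero =>
    show (if ['|'].isPrefixOf cs then (0 : Int) else -1) = _
    rw [prefix_pipe]
    by_cases h : cs[0]? = some '|' <;> simp [lastLt, h]
  | succ j ih =>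
    show (if ['|'].isPrefixOf (cs.drop (j+1)) then ((j:Int)+1) else PySem.Chars.rfind.go cs ['|'] j) = _
    rw [prefix_pipe, ih]
    have hd : (cs.drop (j+1))[0]? = cs[j+1]? := by
      simp [List.getElem?_drop]
    by_cases h : cs[j+1]? = some '|' <;>
      simp [lastLt, hd, h]

theorem lastLt_take (cs : List Char) (k m : Nat) (h : k ≤ m) :
    lastLt (cs.take m) k = lastLt cs k := by
  induction k with
  | zero => rfl
  | succ j ih =>
    have hj : (cs.take m)[j]? = cs[j]? := List.getElem?_take_of_lt (by omega)
    simp [lastLt, hj, ih (by omega)]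

theorem rfindFrom_eq_lastLt (cs : List Char) (i : Nat) (hi : i < cs.length) :
    PySem.Chars.rfindFrom cs ['|'] 0 (some ((i : Int) + 1)) = lastLt cs (i + 1) := by
  unfold PySem.Chars.rfindFrom
  have he : ¬ ((cs.length : Int) < (i : Int) + 1) := by omega
  have ht : ((i : Int) + 1).toNat = i + 1 := by omega
  simp only [he, if_false]
  have h1 : ¬ ((i : Int) + 1 < (0:Int)) := by omega
  have h0 : ¬ ((0:Int) < 0) := by omega
  simp only [h1, if_false, h0, Int.toNat_zero, List.drop_zero]
  have hlen : (cs.take (((i:Int)+1).toNat)).length = i + 1 := by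
    rw [ht]; simp; omega
  have hr : PySem.Chars.rfind (cs.take (((i:Int)+1).toNat)) ['|'] = lastLt cs (i+1) := by
    unfold PySem.Chars.rfind
    rw [hlen, go_eq]
    have hnone : (cs.take (((i:Int)+1).toNat))[i+1]? = none := by
      apply List.getElem?_eq_none
      omega
    rw [ht]
    show lastLt (cs.take (i+1)) (i + 1 + 1) = lastLt cs (i+1)
    rw [show lastLt (cs.take (i+1)) (i+1+1)
          = if (cs.take (i+1))[i+1]? = some '|' then ((i+1 : Nat) : Int) else lastLt (cs.take (i+1)) (i+1) from rfl]
    rw [ht] at hnone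
    simp
    exact lastLt_take cs (i+1) (i+1) le_rfl
  rw [hr]
  by_cases hneg : lastLt cs (i+1) = -1 <;> simp [hneg]

-- lastLt only ever returns -1 or a candle index below k; value bound used nowhere else
theorem lastLt_succ_of_ne (cs : List Char) (k : Nat) (h : ¬ cs[k]? = some '|') :
    lastLt cs (k + 1) = lastLt cs k := by simp [lastLt, h]

-- membership test `c in '*|'` reduces to a disjunction
theorem isIn_star_pipe (c : Char) :
    PySem.Str.isIn (String.ofList [c]) "*|" = (c == '*' || c == '|') := by
  have h0 : PySem.Str.isIn (String.ofList [c]) "*|" = PySem.Chars.isIn [c] ['*', '|'] := by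
    unfold PySem.Str.isIn
    congr 1; simp
  rw [h0]
  by_cases h1 : c = '*'
  · subst h1; decide
  · by_cases h2 : c = '|'
    · subst h2; decide
    · have : ¬ ([c] <:+: ['*', '|']) := by
        intro hinf
        have := hinf.subset (List.mem_singleton_self c)
        simp at this
        tauto
      rw [(PySem.Chars.isIn_eq_false_iff _ _).mpr this]
      simp [h1, h2]

-- B computes pvVal at every position
theorem alt_eq_map (s : String) :
    get_left_alt s = (List.range s.toList.length).map (pvVal s.toList) := by
  unfold get_left_alt
  rw [PySem.List.enumerate_eq_zipIdx_map]
  apply List.ext_getElem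
  · simp
  · intro i h1 h2
    simp only [List.getElem_map, List.getElem_zipIdx, List.getElem_range]
    simp only [List.length_map, List.length_zipIdx] at h1
    rw [isIn_star_pipe, PySem.Str.rfindFrom_eq]
    have hpipe : ("|" : String).toList = ['|'] := rfl
    rw [hpipe]
    have hi' : (0 : Int) + (i : Int) = (i : Int) := by ring
    simp only [zero_add]
    rw [rfindFrom_eq_lastLt s.toList i h1]
    unfold pvVal
    have hget : s.toList[i]? = some (s.toList[i]) := List.getElem?_eq_getElem h1
    by_cases hA : s.toList[i] = '*'
    · simp [hget, hA, lastLt_succ_of_ne s.toList i (by simp [hget, hA])]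
    · by_cases hB : s.toList[i] = '|'
      · simp [hget, hB, lastLt]
      · simp [hget, hA, hB]

-- the partial result after A's loop has processed indices < k
def pvArr (cs : List Char) (k : Nat) : List Int :=
  (List.range cs.length).map (fun i => if i < k then pvVal cs i else -1)

theorem pvArr_zero (cs : List Char) : pvArr cs 0 = List.replicate cs.length (-1) := by
  unfold pvArr
  apply List.ext_getElem <;> simp

theorem pvArr_set (cs : List Char) (k : Nat) (_hk : k < cs.length) :
    (pvArr cs k).set k (pvVal cs k) = pvArr cs (k + 1) := by
  unfold pvArr
  apply List.ext_getElem
  · simp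
  · intro i h1 h2
    simp only [List.getElem_set, List.getElem_map, List.getElem_range]
    simp only [List.length_set, List.length_map, List.length_range] at h1
    by_cases he : k = i
    · subst he; simp
    · have : i < k ↔ i < k + 1 := by omega
      simp [he, this]

theorem pvArr_skip (cs : List Char) (k : Nat) (h : pvVal cs k = -1) :
    pvArr cs k = pvArr cs (k + 1) := by
  unfold pvArr
  apply List.ext_getElem
  · simp
  · intro i h1 h2
    simp only [List.getElem_map, List.getElem_range]
    by_cases he : i = k
    · subst he; simp [h]
    · have : i < k ↔ i < k + 1 := by omega
      simp [this]

-- A's loop invariant, by induction on the number of processed indices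
theorem loop_inv (s : String) (k : Nat) (hk : k ≤ s.toList.length) :
    (PySem.List.pyRange 0 (k : Int) 1).foldl
      (fun (acc : List Int × Int) i =>
        if PySem.Str.pyGet? s i = some '*' then (acc.1.set i.toNat acc.2, acc.2)
        else if PySem.Str.pyGet? s i = some '|' then (acc.1.set i.toNat i, i)
        else acc)
      (List.replicate s.toList.length (-1), -1)
    = (pvArr s.toList k, lastLt s.toList k) := by
  induction k with
  | zero =>
    rw [show ((0:Nat) : Int) = 0 from rfl, PySem.List.pyRange_zero]
    simp [pvArr_zero, lastLt]
  | succ j ih =>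
    have hj : j ≤ s.toList.length := by omega
    have hcast : ((j+1 : Nat) : Int) = (j : Int) + 1 := by omega
    rw [hcast, PySem.List.pyRange_one_succ_right (by positivity)]
    rw [List.foldl_append, ih hj]
    simp only [List.foldl_cons, List.foldl_nil]
    have hjlt : j < s.toList.length := by omega
    have hjeq : s.toList[j]? = some (s.toList[j]'hjlt) := List.getElem?_eq_getElem hjlt
    have hget : PySem.Str.pyGet? s (j : Int) = some (s.toList[j]'hjlt) := by
      rw [PySem.Str.pyGet?_eq]
      show PySem.List.pyGet? s.toList ((j : Nat) : Int) = _
      rw [PySem.List.pyGet?_natCast, hjeq]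
    have htn : ((j : Int)).toNat = j := by omega
    by_cases hA : s.toList[j]'hjlt = '*'
    · have hne : ¬ s.toList[j]? = some '|' := by simp [hjeq, hA]
      have hval : pvVal s.toList j = lastLt s.toList j := by simp [pvVal, hjeq, hA]
      simp only [hget, hA, Option.some.injEq]
      rw [htn, ← hval, pvArr_set s.toList j hjlt, lastLt_succ_of_ne s.toList j hne]
      simp [hval]
    · by_cases hB : s.toList[j]'hjlt = '|'
      · have hpipe : s.toList[j]? = some '|' := by rw [hjeq, hB]
        have hval : pvVal s.toList j = (j : Int) := by
          simp [pvVal, hjeq, hB]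
        simp only [hget, hB, Option.some.injEq]
        rw [htn, ← hval, pvArr_set s.toList j hjlt]
        have hl : lastLt s.toList (j+1) = (j : Int) := by simp [lastLt, hpipe]
        rw [hl]
        simp [hval]
      · have hne : ¬ s.toList[j]? = some '|' := by simp [hjeq, hB]
        have hval : pvVal s.toList j = -1 := by simp [pvVal, hjeq, hA, hB]
        simp only [hget, hA, hB, Option.some.injEq, if_false]
        rw [pvArr_skip s.toList j hval, lastLt_succ_of_ne s.toList j hne]

theorem a_eq_map (s : String) :
    get_left s = (List.range s.toList.length).map (pvVal s.toList) := by
  unfold get_left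
  rw [loop_inv s s.toList.length le_rfl]
  unfold pvArr
  apply List.map_congr_left
  intro i hi
  simp only [List.mem_range] at hi
  rw [if_pos hi]

-- ===== VERDICT (by name: the statement is the Claim_ definition above) =====
theorem get_left_spec : Claim_equal_get_left := by
  intro s _
  show get_left s = get_left_alt s
  rw [a_eq_map, alt_eq_map]
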